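-- pv_equiv track=rewrite | github.com/xlrobotics/preference-based-planning | parser/scltlpref.py | ltl_not
-- ===== SOURCE A (Python) =====
-- def ltl_not(args):
--     """Parse LTLf Not."""
--     if len(args) == 1:
--         return str(args[0])
--     else:
--         f = str(args[-1])
--         for _ in args[:-1]:
--             f = f"!({f})"
--         return f
-- ===== SOURCE B (Python) =====
-- def ltl_not(args):
--     """Parse LTLf Not."""
--     k = len(args) - 1
--     return "!(" * k + str(args[-1]) + ")" * k
-- ===== Notes on version B (the rewrite author's own statement) =====
-- stated objective: faster
-- what changed: Replaced the iterative re-wrapping loop (and its len==1 special case) by a closed-form string build: prefix '!('*k and suffix ')'*k around the last argument, k = len(args)-1.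
import Mathlib
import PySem

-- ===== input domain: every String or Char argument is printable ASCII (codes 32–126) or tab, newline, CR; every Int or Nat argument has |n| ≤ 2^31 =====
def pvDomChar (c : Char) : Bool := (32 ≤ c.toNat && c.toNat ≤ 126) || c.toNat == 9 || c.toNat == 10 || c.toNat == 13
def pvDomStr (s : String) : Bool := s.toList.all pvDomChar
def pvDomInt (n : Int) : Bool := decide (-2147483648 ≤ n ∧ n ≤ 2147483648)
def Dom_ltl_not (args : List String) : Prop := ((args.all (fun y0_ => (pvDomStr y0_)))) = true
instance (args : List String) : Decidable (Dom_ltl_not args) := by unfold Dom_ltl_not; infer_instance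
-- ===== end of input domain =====

-- B replaces A's iterative re-wrapping loop by a closed-form build: "!("*k ++ last ++ ")"*k with k = len-1 (simpler, no special case).


-- ===== PORT A =====
def ltl_not (args : List String) : String :=
  if args.length == 1 then
    (PySem.List.pyGet? args 0).getD ""
  else
    let f := (PySem.List.pyGet? args (-1)).getD ""
    (PySem.List.slice args none (some (-1))).foldl (fun g _ => "!(" ++ g ++ ")") f

-- ===== PORT B =====
def ltl_not_alt (args : List String) : String :=
  let k := args.length - 1
  String.join (List.replicate k "!(") ++ (PySem.List.pyGet? args (-1)).getD ""
    ++ String.join (List.replicate k ")")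

-- ===== PRECONDITION & SPEC =====
-- Pre_ excludes only the empty list, on which A raises IndexError (args[-1]).
def Pre_ltl_not (args : List String) : Prop := args ≠ []
instance (args : List String) : Decidable (Pre_ltl_not args) := by unfold Pre_ltl_not; infer_instance
def pvWitness_ltl_not : List String := (["a", "b"])
def Spec_ltl_not (args : List String) (out : String) : Prop := out = ltl_not_alt args
instance (args : List String) (out : String) : Decidable (Spec_ltl_not args out) := by unfold Spec_ltl_not; infer_instance

-- ===== CLAIM (what is proved, stated in full; the proofs are below) =====
def Claim_equal_ltl_not : Prop := ∀ (args : List String), Dom_ltl_not args → Pre_ltl_not args → Spec_ltl_not args (ltl_not args)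

-- ===== LEMMAS AND PROOFS =====

lemma foldl_append_str (l : List String) (a b : String) :
    List.foldl (fun r s => r ++ s) (a ++ b) l = a ++ List.foldl (fun r s => r ++ s) b l := by
  induction l generalizing b with
  | nil => rfl
  | cons x xs ih => simp [List.foldl_cons, String.append_assoc, ih]

lemma wrap_foldl (l : List String) (f : String) :
    l.foldl (fun g _ => "!(" ++ g ++ ")") f
      = String.join (List.replicate l.length "!(") ++ f ++ String.join (List.replicate l.length ")") := by
  induction l generalizing f with
  | nil => simp [String.join]
  | cons x xs ih =>
      rw [List.foldl_cons, ih, List.length_cons, List.replicate_succ', List.replicate_succ]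
      simp [String.join, String.append_assoc]
      simpa using (foldl_append_str (List.replicate xs.length ")") ")" "").symm

-- ===== VERDICT (by name: the statement is the Claim_ definition above) =====
theorem ltl_not_spec : Claim_equal_ltl_not := by
  intro args _ hpre
  unfold Spec_ltl_not ltl_not ltl_not_alt
  match args, hpre with
  | [a], _ =>
      simp [PySem.List.pyGet?_neg_one, String.join]
  | a :: b :: rest, _ =>
      rw [if_neg (by simp), PySem.List.slice_to_neg_one, wrap_foldl]
      have : (a :: b :: rest).dropLast.length = (a :: b :: rest).length - 1 := by
        simp [List.length_dropLast]
      rw [this]
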